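-- pv_equiv track=rewrite | github.com/FiniteSingularity/aoc-2022 | 08/code.py | generate_hidden_map
-- ===== SOURCE A (Python) =====
-- import itertools
--
-- def transpose(grid: list[list[int]]) -> list[list[int]]:
--     """
--     Transpose the list of lists
--     """
--     return [
--         [row[i] for row in grid] for i in range(0, len(grid))
--     ]
--
-- def generate_hidden_map(grid: list[list[int]]) -> list[list[int]]:
--     """
--     Generate map of max tree
--     """
--     left = [
--         [-1] + list(itertools.accumulate(row, max))[:-1] for row in grid
--     ]
--
--     right = [
--         list(reversed([-1] + list(itertools.accumulate(row[::-1], max))))[1:] for row in grid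
--     ]
--
--     grid_t = transpose(grid)
--     up = transpose([
--         [-1] + list(itertools.accumulate(row, max))[:-1] for row in grid_t
--     ])
--
--     down = transpose([
--         list(reversed([-1] + list(itertools.accumulate(row[::-1], max))))[1:] for row in grid_t
--     ])
--
--     max_map = [[min(val) for val in zip(left[i], right[i], up[i], down[i])]
--                for i in range(len(left))]
--     hidden = [[0 if row[0][col] <= row[1][col] else 1 for col in range(
--         len(row[0]))] for row in list(zip(grid, max_map))]
--     return hidden
-- ===== SOURCE B (Python) =====
-- def generate_hidden_map(grid):
--     """
--     Generate map of max tree: direct per-cell outward scan (no accumulation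
--     tables, no transposes).
--     """
--     n = len(grid)
--     hidden = []
--     for i in range(n):
--         row = grid[i]
--         out = []
--         for j in range(len(row)):
--             l = max(row[:j], default=-1)
--             r = max(row[j + 1:], default=-1)
--             col = [grid[k][j] for k in range(n)]
--             u = max(col[:i], default=-1)
--             d = max(col[i + 1:], default=-1)
--             out.append(0 if row[j] <= min(l, r, u, d) else 1)
--         hidden.append(out)
--     return hidden
-- ===== Notes on version B (the rewrite author's own statement) =====
-- stated objective: simpler
-- what changed: Replaced the four itertools.accumulate prefix-max tables, the two transposes and the zip/min merge with a direct per-cell scan that takes the max of each of the four outward slices (left/right of the row, above/below in the column) and compares once.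
import Mathlib
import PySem

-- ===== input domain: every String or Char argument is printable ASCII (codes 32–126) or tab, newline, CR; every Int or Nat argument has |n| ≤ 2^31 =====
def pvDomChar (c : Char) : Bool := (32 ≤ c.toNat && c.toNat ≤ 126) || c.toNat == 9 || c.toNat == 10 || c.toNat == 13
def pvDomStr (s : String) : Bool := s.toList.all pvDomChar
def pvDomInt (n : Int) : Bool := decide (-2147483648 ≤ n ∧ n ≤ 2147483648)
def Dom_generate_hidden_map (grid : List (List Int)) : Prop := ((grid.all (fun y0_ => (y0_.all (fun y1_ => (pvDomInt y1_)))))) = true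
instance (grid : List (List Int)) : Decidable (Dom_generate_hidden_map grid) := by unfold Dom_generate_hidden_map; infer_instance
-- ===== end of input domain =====

-- B replaces A's four accumulated prefix-max tables + transposes by a direct per-cell
-- outward scan (simpler, not faster); equivalence is proved on square grids (Pre_),
-- the only grids on which A returns at all.

-- ===== PORT A =====
-- itertools.accumulate(row, max)
def pvAccFrom (a : Int) : List Int → List Int
  | [] => []
  | y :: t => max a y :: pvAccFrom (max a y) t

def pvAccumax : List Int → List Int
  | [] => []
  | x :: t => x :: pvAccFrom x t

-- transpose(grid): [[row[i] for row in grid] for i in range(0, len(grid))]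
-- row[i] raises IndexError on short rows; pyGetD's default is only reached outside Pre_.
def pvTranspose (g : List (List Int)) : List (List Int) :=
  (List.range g.length).map (fun (i : Nat) => g.map (fun row => PySem.List.pyGetD row (i : Int) 0))

def generate_hidden_map (grid : List (List Int)) : List (List Int) :=
  let left := grid.map (fun row => [-1] ++ PySem.List.slice (pvAccumax row) none (some (-1)))
  let right := grid.map (fun row => PySem.List.slice (((-1) :: pvAccumax row.reverse).reverse) (some 1) none)
  let grid_t := pvTranspose grid
  let up := pvTranspose (grid_t.map (fun row => [-1] ++ PySem.List.slice (pvAccumax row) none (some (-1))))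
  let down := pvTranspose (grid_t.map (fun row => PySem.List.slice (((-1) :: pvAccumax row.reverse).reverse) (some 1) none))
  let max_map := (List.range left.length).map (fun (i : Nat) =>
    ((PySem.List.pyGetD left (i : Int) []).zip
      ((PySem.List.pyGetD right (i : Int) []).zip
        ((PySem.List.pyGetD up (i : Int) []).zip (PySem.List.pyGetD down (i : Int) [])))).map
      (fun v => min (min (min v.1 v.2.1) v.2.2.1) v.2.2.2))
  (grid.zip max_map).map (fun row =>
    (List.range row.1.length).map (fun (col : Nat) =>
      if PySem.List.pyGetD row.1 (col : Int) 0 ≤ PySem.List.pyGetD row.2 (col : Int) 0 then (0 : Int) else 1))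

-- ===== PORT B =====
def generate_hidden_map_alt (grid : List (List Int)) : List (List Int) :=
  let n := grid.length
  (List.range n).map (fun (i : Nat) =>
    let row := PySem.List.pyGetD grid (i : Int) []
    (List.range row.length).map (fun (j : Nat) =>
      let l := PySem.List.maxD (PySem.List.slice row none (some (j : Int))) (fun x => x) (-1)
      let r := PySem.List.maxD (PySem.List.slice row (some ((j : Int) + 1)) none) (fun x => x) (-1)
      let col := (List.range n).map (fun (k : Nat) => PySem.List.pyGetD (PySem.List.pyGetD grid (k : Int) []) (j : Int) 0)
      let u := PySem.List.maxD (PySem.List.slice col none (some (i : Int))) (fun x => x) (-1)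
      let d := PySem.List.maxD (PySem.List.slice col (some ((i : Int) + 1)) none) (fun x => x) (-1)
      if PySem.List.pyGetD row (j : Int) 0 ≤ min (min (min l r) u) d then (0 : Int) else 1))

-- ===== PRECONDITION & SPEC =====
-- Pre_ excludes exactly the non-square grids: on every one of them A raises IndexError
-- (in transpose if some row is shorter than the row count, otherwise in the final
-- zip-truncated indexing loop), so A returns a value precisely on square grids.
def Pre_generate_hidden_map (grid : List (List Int)) : Prop :=
  ∀ row ∈ grid, row.length = grid.length
instance (grid : List (List Int)) : Decidable (Pre_generate_hidden_map grid) := by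
  unfold Pre_generate_hidden_map; infer_instance

def pvWitness_generate_hidden_map : List (List Int) := [[3, 0], [2, 5]]

def Spec_generate_hidden_map (grid : List (List Int)) (out : List (List Int)) : Prop :=
  out = generate_hidden_map_alt grid
instance (grid : List (List Int)) (out : List (List Int)) : Decidable (Spec_generate_hidden_map grid out) := by
  unfold Spec_generate_hidden_map; infer_instance

-- ===== CLAIM (what is proved, stated in full; the proofs are below) =====
def Claim_equal_generate_hidden_map : Prop := ∀ (grid : List (List Int)), Dom_generate_hidden_map grid → Pre_generate_hidden_map grid → Spec_generate_hidden_map grid (generate_hidden_map grid)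

-- ===== LEMMAS AND PROOFS =====

-- Python's max(xs, default=-1): -1 on the empty list, else the running max.
def pvM : List Int → Int
  | [] => -1
  | x :: t => t.foldl max x

theorem pvMaxD_eq_pvM (l : List Int) :
    PySem.List.maxD l (fun x => x) (-1) = pvM l := by
  cases l with
  | nil => rfl
  | cons x t => simp [PySem.List.maxD, PySem.List.max?_id_cons, pvM]

theorem pvM_isMax (l : List Int) : ∀ y ∈ l, y ≤ pvM l := by
  intro y hy
  cases l with
  | nil => cases hy
  | cons x t =>
    rcases List.mem_cons.mp hy with h | h
    · subst h; exact (PySem.List.le_foldl_max t y).1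
    · exact (PySem.List.le_foldl_max t x).2 y h

theorem pvM_mem (l : List Int) (h : l ≠ []) : pvM l ∈ l := by
  cases l with
  | nil => exact absurd rfl h
  | cons x t =>
    rcases PySem.List.foldl_max_mem t x with h1 | h1
    · simp [pvM, h1]
    · simp [pvM, h1]

theorem pvM_reverse (l : List Int) : pvM l.reverse = pvM l := by
  cases hl : l with
  | nil => rfl
  | cons x t =>
    have hne : l ≠ [] := by simp [hl]
    have hne' : l.reverse ≠ [] := by simp [hl]
    rw [← hl]
    exact le_antisymm
      (pvM_isMax l _ (List.mem_reverse.mp (pvM_mem l.reverse hne')))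
      (pvM_isMax l.reverse _ (List.mem_reverse.mpr (pvM_mem l hne)))

theorem pvAccFrom_length (a : Int) (t : List Int) : (pvAccFrom a t).length = t.length := by
  induction t generalizing a with
  | nil => rfl
  | cons y t ih => simp [pvAccFrom, ih]

theorem pvAccumax_length (l : List Int) : (pvAccumax l).length = l.length := by
  cases l with
  | nil => rfl
  | cons x t => simp [pvAccumax, pvAccFrom_length]

theorem pvAccFrom_getD (a : Int) (t : List Int) (j : Nat) (h : j < t.length) :
    (pvAccFrom a t).getD j 0 = (t.take (j + 1)).foldl max a := by
  induction t generalizing a j with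
  | nil => cases h
  | cons y t ih =>
    cases j with
    | zero => simp [pvAccFrom]
    | succ j => simpa [pvAccFrom] using ih (max a y) j (by simpa using h)

theorem pvAccumax_getD (l : List Int) (j : Nat) (h : j < l.length) :
    (pvAccumax l).getD j 0 = pvM (l.take (j + 1)) := by
  cases l with
  | nil => cases h
  | cons x t =>
    cases j with
    | zero => simp [pvAccumax, pvM]
    | succ j =>
      have := pvAccFrom_getD x t j (by simpa using h)
      simpa [pvAccumax, pvM] using this

-- left/up row: ([-1] + list(accumulate(row, max))[:-1])[j] = max(row[:j], default=-1)
theorem pvLeft_getD (row : List Int) (j : Nat) (hj : j < row.length) :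
    ([-1] ++ PySem.List.slice (pvAccumax row) none (some (-1))).getD j 0 = pvM (row.take j) := by
  rw [PySem.List.slice_to_neg_one]
  cases j with
  | zero => simp [pvM]
  | succ j =>
    have hj' : j < (pvAccumax row).dropLast.length := by
      simp [pvAccumax_length]; omega
    rw [List.singleton_append, List.getD_cons_succ,
        List.getD_eq_getElem _ _ hj', List.getElem_dropLast,
        ← List.getD_eq_getElem _ 0 (by simp [pvAccumax_length]; omega : j < (pvAccumax row).length),
        pvAccumax_getD row j (by omega)]

theorem pvLeft_length (row : List Int) (h : row ≠ []) :
    ([-1] ++ PySem.List.slice (pvAccumax row) none (some (-1))).length = row.length := by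
  have hl : 0 < row.length := List.length_pos_iff.mpr h
  simp [PySem.List.slice_to_neg_one, pvAccumax_length]
  omega

-- right/down row: (list(reversed([-1] + accumulate(row[::-1], max)))[1:])[j] = max(row[j+1:], default=-1)
theorem pvRight_length (row : List Int) :
    (PySem.List.slice (((-1) :: pvAccumax row.reverse).reverse) (some 1) none).length = row.length := by
  simp [PySem.List.slice_from_one, pvAccumax_length]

theorem pvRight_getD (row : List Int) (j : Nat) (hj : j < row.length) :
    (PySem.List.slice (((-1) :: pvAccumax row.reverse).reverse) (some 1) none).getD j 0
      = pvM (row.drop (j + 1)) := by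
  rw [PySem.List.slice_from_one]
  have hA : (pvAccumax row.reverse).length = row.length := by simp [pvAccumax_length]
  have hsplit : (((-1 : Int) :: pvAccumax row.reverse).reverse).tail
      = (pvAccumax row.reverse).reverse.tail ++ [-1] := by
    rw [List.reverse_cons]
    cases hAr : (pvAccumax row.reverse).reverse with
    | nil =>
      exfalso
      have : (pvAccumax row.reverse).length = 0 := by
        simpa using congrArg List.length hAr
      omega
    | cons a t => simp
  rw [hsplit]
  by_cases hlast : j = row.length - 1
  · rw [List.getD_append_right _ _ _ _ (by simp [hA]; omega)]
    have h1 : j - ((pvAccumax row.reverse).reverse.tail).length = 0 := by simp [hA]; omega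
    have h2 : row.drop (j + 1) = [] := by
      apply List.drop_eq_nil_of_le; omega
    rw [h1, h2]
    rfl
  · have hjlt : j < ((pvAccumax row.reverse).reverse.tail).length := by simp [hA]; omega
    rw [List.getD_append _ _ _ _ hjlt, List.getD_eq_getElem _ _ hjlt, List.getElem_tail,
        List.getElem_reverse,
        ← List.getD_eq_getElem _ 0 (by omega :
          (pvAccumax row.reverse).length - 1 - (j + 1) < (pvAccumax row.reverse).length)]
    have hidx : (pvAccumax row.reverse).length - 1 - (j + 1) = row.length - j - 2 := by
      rw [hA]; omega
    rw [hidx, pvAccumax_getD row.reverse (row.length - j - 2) (by simp; omega)]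
    have h3 : row.length - j - 2 + 1 = row.length - j - 1 := by omega
    rw [h3, List.take_reverse]
    have h4 : row.length - (row.length - j - 1) = j + 1 := by omega
    rw [h4, pvM_reverse]

-- column of the grid
theorem pvTranspose_length (g : List (List Int)) : (pvTranspose g).length = g.length := by
  simp [pvTranspose]

theorem pvTranspose_getD (g : List (List Int)) (i : Nat) (h : i < g.length) :
    (pvTranspose g).getD i [] = g.map (fun row => PySem.List.pyGetD row (i : Int) 0) := by
  rw [List.getD_eq_getElem _ _ (by simpa [pvTranspose_length] using h)]
  simp only [pvTranspose, List.getElem_map, List.getElem_range]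

-- the j-th column of the grid, as A's transpose reads it
def pvCol (grid : List (List Int)) (j : Nat) : List Int :=
  grid.map (fun row => PySem.List.pyGetD row (j : Int) 0)

-- the common per-cell value both programs compute
def pvCell (grid : List (List Int)) (i j : Nat) : Int :=
  if (grid.getD i []).getD j 0 ≤
      min (min (min (pvM ((grid.getD i []).take j)) (pvM ((grid.getD i []).drop (j + 1))))
        (pvM ((pvCol grid j).take i))) (pvM ((pvCol grid j).drop (i + 1)))
  then 0 else 1

theorem pvColB_eq (grid : List (List Int)) (j : Nat) :
    (List.range grid.length).map
        (fun (k : Nat) => PySem.List.pyGetD (PySem.List.pyGetD grid (k : Int) []) (j : Int) 0)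
      = pvCol grid j := by
  apply List.ext_getElem (by simp [pvCol])
  intro k h1 h2
  simp only [List.getElem_map, List.getElem_range, pvCol,
    PySem.List.pyGetD_natCast]
  congr 1
  exact List.getD_eq_getElem grid [] (by simpa [pvCol] using h2)

theorem pvCast_succ (j : Nat) : ((j : Int) + 1) = ((j + 1 : Nat) : Int) := by push_cast; ring

theorem B_char (grid : List (List Int)) (hpre : Pre_generate_hidden_map grid) :
    generate_hidden_map_alt grid
      = (List.range grid.length).map (fun (i : Nat) =>
          (List.range grid.length).map (fun (j : Nat) => pvCell grid i j)) := by
  simp only [generate_hidden_map_alt]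
  apply List.map_congr_left
  intro i hi
  have hi' : i < grid.length := List.mem_range.mp hi
  have hrow : PySem.List.pyGetD grid (i : Int) [] = grid.getD i [] :=
    PySem.List.pyGetD_natCast grid i []
  have hrowlen : (PySem.List.pyGetD grid (i : Int) []).length = grid.length := by
    rw [hrow, List.getD_eq_getElem _ _ hi']
    exact hpre _ (List.getElem_mem hi')
  rw [hrowlen]
  apply List.map_congr_left
  intro j hj
  have hj' : j < grid.length := List.mem_range.mp hj
  rw [pvColB_eq, hrow, pvCast_succ j, pvCast_succ i,
    PySem.List.slice_to_natCast, PySem.List.slice_from_natCast,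
    PySem.List.slice_to_natCast, PySem.List.slice_from_natCast,
    pvMaxD_eq_pvM, pvMaxD_eq_pvM, pvMaxD_eq_pvM, pvMaxD_eq_pvM,
    PySem.List.pyGetD_natCast]
  rfl

theorem pvGetD_map (g : List (List Int)) (f : List Int → List Int) (i : Nat)
    (h : i < g.length) : (g.map f).getD i [] = f (g.getD i []) := by
  rw [List.getD_eq_getElem _ _ (by simpa using h), List.getElem_map,
    List.getD_eq_getElem _ _ h]

theorem pvCol_length (grid : List (List Int)) (j : Nat) :
    (pvCol grid j).length = grid.length := by simp [pvCol]

theorem pvUp_val (grid : List (List Int)) (i j : Nat) (hi : i < grid.length)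
    (hj : j < grid.length) :
    ((pvTranspose ((pvTranspose grid).map
        (fun row => [-1] ++ PySem.List.slice (pvAccumax row) none (some (-1))))).getD i []).getD j 0
      = pvM ((pvCol grid j).take i) := by
  rw [pvTranspose_getD _ i (by simpa [pvTranspose_length] using hi)]
  rw [List.getD_eq_getElem _ _ (by simpa [pvTranspose_length] using hj)]
  simp only [List.getElem_map]
  rw [← List.getD_eq_getElem (pvTranspose grid) [] (by simpa [pvTranspose_length] using hj),
    pvTranspose_getD grid j hj]
  show PySem.List.pyGetD ([-1] ++ PySem.List.slice (pvAccumax (pvCol grid j)) none (some (-1))) (i : Int) 0 = _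
  rw [PySem.List.pyGetD_natCast, pvLeft_getD (pvCol grid j) i (by simpa [pvCol_length] using hi)]

theorem pvDown_val (grid : List (List Int)) (i j : Nat) (hi : i < grid.length)
    (hj : j < grid.length) :
    ((pvTranspose ((pvTranspose grid).map
        (fun row => PySem.List.slice (((-1) :: pvAccumax row.reverse).reverse) (some 1) none))).getD i []).getD j 0
      = pvM ((pvCol grid j).drop (i + 1)) := by
  rw [pvTranspose_getD _ i (by simpa [pvTranspose_length] using hi)]
  rw [List.getD_eq_getElem _ _ (by simpa [pvTranspose_length] using hj)]
  simp only [List.getElem_map]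
  rw [← List.getD_eq_getElem (pvTranspose grid) [] (by simpa [pvTranspose_length] using hj),
    pvTranspose_getD grid j hj]
  show PySem.List.pyGetD (PySem.List.slice (((-1) :: pvAccumax (pvCol grid j).reverse).reverse) (some 1) none) (i : Int) 0 = _
  rw [PySem.List.pyGetD_natCast, pvRight_getD (pvCol grid j) i (by simpa [pvCol_length] using hi)]

theorem pvUp_len (grid : List (List Int)) (i : Nat) (hi : i < grid.length)
    (f : List Int → List Int) :
    ((pvTranspose ((pvTranspose grid).map f)).getD i []).length = grid.length := by
  rw [pvTranspose_getD _ i (by simpa [pvTranspose_length] using hi)]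
  simp [pvTranspose_length]

theorem pvMin4_getD (a b c d : List Int) (j : Nat) (ha : j < a.length)
    (hb : j < b.length) (hc : j < c.length) (hd : j < d.length) :
    ((a.zip (b.zip (c.zip d))).map
        (fun v => min (min (min v.1 v.2.1) v.2.2.1) v.2.2.2)).getD j 0
      = min (min (min (a.getD j 0) (b.getD j 0)) (c.getD j 0)) (d.getD j 0) := by
  rw [List.getD_eq_getElem _ _ (by simp; omega)]
  simp [List.getElem_zip, ha, hb, hc, hd]

theorem A_char (grid : List (List Int)) (hpre : Pre_generate_hidden_map grid) :
    generate_hidden_map grid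
      = (List.range grid.length).map (fun (i : Nat) =>
          (List.range grid.length).map (fun (j : Nat) => pvCell grid i j)) := by
  have hlen : ∀ {i : Nat}, i < grid.length → (grid.getD i []).length = grid.length := by
    intro i h
    rw [List.getD_eq_getElem _ _ h]
    exact hpre _ (List.getElem_mem h)
  simp only [generate_hidden_map]
  apply List.ext_getElem
  · simp
  intro i h1 h2
  have hi : i < grid.length := by simpa using h2
  simp only [List.getElem_map, List.getElem_zip, List.getElem_range]
  have hrowlen : (grid[i]'hi).length = grid.length := hpre _ (List.getElem_mem hi)
  rw [hrowlen]
  apply List.map_congr_left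
  intro j hj
  have hjlt : j < grid.length := List.mem_range.mp hj
  have hne : grid.getD i [] ≠ [] := by
    intro hno
    have := hlen hi
    rw [hno] at this
    simp at this
    omega
  have hrow : grid[i]'hi = grid.getD i [] := (List.getD_eq_getElem grid [] hi).symm
  rw [hrow]
  have hLi : PySem.List.pyGetD
      (grid.map (fun row => [-1] ++ PySem.List.slice (pvAccumax row) none (some (-1)))) (i : Int) []
      = [-1] ++ PySem.List.slice (pvAccumax (grid.getD i [])) none (some (-1)) := by
    rw [PySem.List.pyGetD_natCast, pvGetD_map _ _ i hi]
  have hRi : PySem.List.pyGetD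
      (grid.map (fun row => PySem.List.slice (((-1) :: pvAccumax row.reverse).reverse) (some 1) none)) (i : Int) []
      = PySem.List.slice (((-1) :: pvAccumax (grid.getD i []).reverse).reverse) (some 1) none := by
    rw [PySem.List.pyGetD_natCast, pvGetD_map _ _ i hi]
  rw [hLi, hRi, PySem.List.pyGetD_natCast, PySem.List.pyGetD_natCast,
    PySem.List.pyGetD_natCast, PySem.List.pyGetD_natCast]
  rw [pvMin4_getD _ _ _ _ j
    (by rw [pvLeft_length _ hne, hlen hi]; exact hjlt)
    (by rw [pvRight_length, hlen hi]; exact hjlt)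
    (by rw [pvUp_len grid i hi]; exact hjlt)
    (by rw [pvUp_len grid i hi]; exact hjlt)]
  rw [pvLeft_getD _ j (by rw [hlen hi]; exact hjlt),
    pvRight_getD _ j (by rw [hlen hi]; exact hjlt),
    pvUp_val grid i j hi hjlt, pvDown_val grid i j hi hjlt]
  rfl

-- ===== VERDICT (by name: the statement is the Claim_ definition above) =====
theorem generate_hidden_map_spec : Claim_equal_generate_hidden_map := by
  intro grid _ hpre
  unfold Spec_generate_hidden_map
  rw [A_char grid hpre, B_char grid hpre]
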